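-- pv_equiv track=rewrite | github.com/brandoneng000/LeetCode | medium/1090.py | largestValsFromLabels
-- ===== SOURCE A (Python) =====
-- from typing import List
-- import collections
-- import heapq
--
-- def largestValsFromLabels(values: List[int], labels: List[int], numWanted: int, useLimit: int) -> int:
--     label_usage = collections.Counter()
--     heap = []
--     res = 0
--
--     for val, label in zip(values, labels):
--         heapq.heappush(heap, (-val, label))
--
--     while heap and numWanted:
--         val, label = heapq.heappop(heap)
--
--         if label_usage[label] < useLimit:
--             numWanted -= 1
--             res += -val
--             label_usage[label] += 1
--
--     return res
-- ===== SOURCE B (Python) =====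
-- def largestValsFromLabels(values, labels, numWanted, useLimit):
--     # Stage 1: bucket the values by label.
--     groups = {}
--     for v, l in zip(values, labels):
--         groups.setdefault(l, []).append(v)
--     # Stage 2: the label cap is enforced up front: each label contributes at
--     # most its useLimit largest values as candidates.
--     candidates = []
--     for l, vs in groups.items():
--         t = 0
--         for v in sorted(vs, reverse=True):
--             if t >= useLimit:
--                 break
--             candidates.append((v, l))
--             t += 1
--     # Stage 3: plain top-numWanted selection over the capped candidates —
--     # no per-label bookkeeping is needed any more.
--     candidates.sort(key=lambda p: (-p[0], p[1]))
--     res = 0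
--     for v, l in candidates:
--         if numWanted == 0:
--             break
--         res += v
--         numWanted -= 1
--     return res
-- ===== Notes on version B (the rewrite author's own statement) =====
-- stated objective: alternative
-- what changed: Instead of a heap popped with a per-label usage counter, B buckets the values by label, pre-truncates each bucket to its useLimit largest values, and then does a plain top-numWanted selection over the capped candidates with no per-label bookkeeping in the selection pass.
import Mathlib
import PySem

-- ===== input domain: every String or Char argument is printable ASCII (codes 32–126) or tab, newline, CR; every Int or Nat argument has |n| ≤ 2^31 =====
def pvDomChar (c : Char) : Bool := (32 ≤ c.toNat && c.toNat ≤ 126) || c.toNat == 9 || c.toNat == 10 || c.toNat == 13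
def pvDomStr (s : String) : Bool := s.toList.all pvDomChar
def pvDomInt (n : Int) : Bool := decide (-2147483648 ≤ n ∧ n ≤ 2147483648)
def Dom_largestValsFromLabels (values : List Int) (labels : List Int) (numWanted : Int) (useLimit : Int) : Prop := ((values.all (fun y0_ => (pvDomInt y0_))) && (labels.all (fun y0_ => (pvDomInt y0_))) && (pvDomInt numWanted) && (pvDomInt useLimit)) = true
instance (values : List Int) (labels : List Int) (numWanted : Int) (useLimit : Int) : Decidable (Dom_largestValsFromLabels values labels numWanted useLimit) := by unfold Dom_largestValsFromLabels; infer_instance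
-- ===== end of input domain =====

-- B replaces A's heap-with-usage-counter greedy by three stages: bucket the values by
-- label, pre-truncate each bucket to its useLimit largest values, then select the top
-- numWanted of the capped candidates with no per-label bookkeeping (objective: alternative).

-- ===== PORT A =====
-- heapq has no PySem primitive; the heap of (-val, label) pairs is ported by hand as a
-- min-heap (skew heap) ordered by Python's lexicographic tuple comparison (toLex).
-- heappush = merge with a singleton, heappop = root + merge of the children: the sequence
-- of popped pairs is exactly heapq's (ties are between identical pairs).
inductive PvHeap : Type
  | nil : PvHeap
  | node : Int × Int → PvHeap → PvHeap → PvHeap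
deriving DecidableEq, Repr

def PvHeap.size : PvHeap → Nat
  | .nil => 0
  | .node _ l r => l.size + r.size + 1

-- termination facts for the heap operations (cited by name in decreasing_by)
theorem pvMergeDecL (p1 : Int × Int) (l1 r1 h2 : PvHeap) :
    r1.size + h2.size < (PvHeap.node p1 l1 r1).size + h2.size := by
  simp [PvHeap.size]

theorem pvMergeDecR (h1 : PvHeap) (p2 : Int × Int) (l2 r2 : PvHeap) :
    h1.size + r2.size < h1.size + (PvHeap.node p2 l2 r2).size := by
  simp [PvHeap.size]

def pvMerge : PvHeap → PvHeap → PvHeap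
  | .nil, h => h
  | .node p l r, .nil => .node p l r
  | .node p1 l1 r1, .node p2 l2 r2 =>
      if toLex p1 ≤ toLex p2 then .node p1 (pvMerge r1 (.node p2 l2 r2)) l1
      else .node p2 (pvMerge (.node p1 l1 r1) r2) l2
termination_by h1 h2 => h1.size + h2.size
decreasing_by
  · exact pvMergeDecL p1 l1 r1 (PvHeap.node p2 l2 r2)
  · exact pvMergeDecR (PvHeap.node p1 l1 r1) p2 l2 r2

-- the 'while heap and numWanted' loop of A, with Counter lookup/update as getD/insert;
-- the Nat fuel (called with fuel = heap size, which strictly decreases per pop) only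
-- makes the recursion structural — the 0-fuel branch is never reached
def pvALoop (useLimit : Int) : Nat → PvHeap → Int → PySem.Dict Int Int → Int → Int
  | _, .nil, _, _, res => res
  | 0, _, _, _, res => res
  | fuel + 1, .node p l r, numWanted, usage, res =>
      if numWanted = 0 then res
      else if usage.getD p.2 0 < useLimit then
        pvALoop useLimit fuel (pvMerge l r) (numWanted - 1)
          (usage.insert p.2 (usage.getD p.2 0 + 1)) (res + -p.1)
      else pvALoop useLimit fuel (pvMerge l r) numWanted usage res

def largestValsFromLabels (values : List Int) (labels : List Int) (numWanted : Int) (useLimit : Int) : Int :=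
  let heap := (values.zip labels).foldl
    (fun h p => pvMerge (PvHeap.node (-p.1, p.2) PvHeap.nil PvHeap.nil) h) PvHeap.nil
  pvALoop useLimit heap.size heap numWanted PySem.Dict.empty 0

-- ===== PORT B =====
-- the inner per-bucket truncation loop of Source B (state: k = useLimit - t, so the
-- Python guard 't >= useLimit' is 'k ≤ 0')
def pvTake {α : Type} (k : Int) : List α → List α
  | [] => []
  | x :: xs => if k ≤ 0 then [] else x :: pvTake (k - 1) xs

-- the final selection loop of Source B ('if numWanted == 0: break')
def pvSel : List (Int × Int) → Int → Int → Int
  | [], _, res => res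
  | p :: rest, numWanted, res =>
      if numWanted = 0 then res else pvSel rest (numWanted - 1) (res + p.1)

def largestValsFromLabels_alt (values : List Int) (labels : List Int) (numWanted : Int) (useLimit : Int) : Int :=
  -- Stage 1: bucket the values by label (setdefault+append = insert at getD ++ [v])
  let groups := (values.zip labels).foldl
    (fun d p => d.insert p.2 (d.getD p.2 [] ++ [p.1])) (PySem.Dict.empty (κ := Int) (ν := List Int))
  -- Stage 2: each bucket contributes at most its useLimit largest values
  let candidates := groups.items.foldl
    (fun acc q => acc ++ (pvTake useLimit (PySem.List.sorted q.2 (fun x => x) true)).map (fun v => (v, q.1))) []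
  -- Stage 3: plain top-numWanted selection over the capped candidates
  pvSel (PySem.List.sorted2 candidates (fun p => -p.1) (fun p => p.2)) numWanted 0

-- ===== PRECONDITION & SPEC =====
def Spec_largestValsFromLabels (values : List Int) (labels : List Int) (numWanted : Int) (useLimit : Int) (out : Int) : Prop := out = largestValsFromLabels_alt values labels numWanted useLimit
instance (values : List Int) (labels : List Int) (numWanted : Int) (useLimit : Int) (out : Int) : Decidable (Spec_largestValsFromLabels values labels numWanted useLimit out) := by unfold Spec_largestValsFromLabels; infer_instance

-- ===== CLAIM (what is proved, stated in full; the proofs are below) =====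
def Claim_equal_largestValsFromLabels : Prop := ∀ (values : List Int) (labels : List Int) (numWanted : Int) (useLimit : Int), Dom_largestValsFromLabels values labels numWanted useLimit → Spec_largestValsFromLabels values labels numWanted useLimit (largestValsFromLabels values labels numWanted useLimit)

-- ===== LEMMAS AND PROOFS =====

-- the common sort key of both programs, and its injectivity
def pvKey (p : Int × Int) : Lex (Int × Int) := toLex ((-p.1 : Int), p.2)

theorem pvKeyInj : Function.Injective pvKey := by
  intro p q hpq
  have h' : ((-p.1 : Int), p.2) = ((-q.1 : Int), q.2) := toLex_inj.mp hpq
  have h1 := congrArg Prod.fst h'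
  have h2 := congrArg Prod.snd h'
  simp only at h1 h2
  exact Prod.ext_iff.mpr ⟨by omega, h2⟩

-- ---------- A side: the heap pops its elements in sorted order ----------
theorem pvMerge_size (a b : PvHeap) : (pvMerge a b).size = a.size + b.size := by
  fun_induction pvMerge a b <;> simp_all [PvHeap.size] <;> omega

-- cited by pvPopAll's decreasing_by
theorem pvMergeDec (p : Int × Int) (l r : PvHeap) :
    (pvMerge l r).size < (PvHeap.node p l r).size := by
  simp [pvMerge_size, PvHeap.size]

def pvElems : PvHeap → List (Int × Int)
  | .nil => []
  | .node p l r => p :: (pvElems l ++ pvElems r)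

theorem pvMerge_perm (a b : PvHeap) :
    (pvElems (pvMerge a b)).Perm (pvElems a ++ pvElems b) := by
  fun_induction pvMerge a b with
  | case1 h => simp [pvElems]
  | case2 p l r => simp [pvElems]
  | case3 p1 l1 r1 p2 l2 r2 hle ih =>
    have h1 : (pvElems (pvMerge r1 (PvHeap.node p2 l2 r2)) ++ pvElems l1).Perm
        (pvElems l1 ++ (pvElems r1 ++ pvElems (PvHeap.node p2 l2 r2))) :=
      (ih.append_right _).trans List.perm_append_comm
    simpa [pvElems, List.append_assoc] using List.Perm.cons p1 h1
  | case4 p1 l1 r1 p2 l2 r2 hle ih =>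
    have h2 : (pvElems (pvMerge (PvHeap.node p1 l1 r1) r2) ++ pvElems l2).Perm
        (pvElems (PvHeap.node p1 l1 r1) ++ (pvElems l2 ++ pvElems r2)) := by
      refine (ih.append_right _).trans ?_
      rw [List.append_assoc]
      exact List.Perm.append_left _ List.perm_append_comm
    have h3 := (List.Perm.cons p2 h2).trans (List.perm_middle (a := p2)
      (l₁ := pvElems (PvHeap.node p1 l1 r1)) (l₂ := pvElems l2 ++ pvElems r2)).symm
    simpa [pvElems] using h3

def pvOrdered : PvHeap → Prop
  | .nil => True
  | .node p l r => (∀ q ∈ pvElems l, toLex p ≤ toLex q) ∧ (∀ q ∈ pvElems r, toLex p ≤ toLex q)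
      ∧ pvOrdered l ∧ pvOrdered r

theorem pvMerge_ordered (a b : PvHeap) :
    pvOrdered a → pvOrdered b → pvOrdered (pvMerge a b) := by
  fun_induction pvMerge a b with
  | case1 h => exact fun _ hb => hb
  | case2 p l r => exact fun ha _ => ha
  | case3 p1 l1 r1 p2 l2 r2 hle ih =>
    intro ha hb
    obtain ⟨hal, har, hol, hor⟩ := ha
    obtain ⟨hbl, hbr, hol2, hor2⟩ := hb
    refine ⟨?_, hal, ih hor ⟨hbl, hbr, hol2, hor2⟩, hol⟩
    intro q hq
    have hq' := (pvMerge_perm r1 (PvHeap.node p2 l2 r2)).mem_iff.mp hq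
    rcases List.mem_append.mp hq' with h | h
    · exact har q h
    · simp only [pvElems, List.mem_cons, List.mem_append] at h
      rcases h with rfl | h | h
      · exact hle
      · exact hle.trans (hbl q h)
      · exact hle.trans (hbr q h)
  | case4 p1 l1 r1 p2 l2 r2 hle ih =>
    intro ha hb
    have hle' : toLex p2 ≤ toLex p1 := le_of_not_ge hle
    obtain ⟨hal, har, hol, hor⟩ := ha
    obtain ⟨hbl, hbr, hol2, hor2⟩ := hb
    refine ⟨?_, hbl, ih ⟨hal, har, hol, hor⟩ hor2, hol2⟩
    intro q hq
    have hq' := (pvMerge_perm (PvHeap.node p1 l1 r1) r2).mem_iff.mp hq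
    rcases List.mem_append.mp hq' with h | h
    · simp only [pvElems, List.mem_cons, List.mem_append] at h
      rcases h with rfl | h | h
      · exact hle'
      · exact hle'.trans (hal q h)
      · exact hle'.trans (har q h)
    · exact hbr q h

def pvPopAll : PvHeap → List (Int × Int)
  | .nil => []
  | .node p l r => p :: pvPopAll (pvMerge l r)
termination_by h => h.size
decreasing_by exact pvMergeDec p l r

theorem pvPopAll_perm (h : PvHeap) : (pvPopAll h).Perm (pvElems h) := by
  fun_induction pvPopAll h with
  | case1 => simp [pvElems]
  | case2 p l r ih =>
    simpa [pvElems] using List.Perm.cons p (ih.trans (pvMerge_perm l r))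

theorem pvPopAll_pairwise (h : PvHeap) :
    pvOrdered h → (pvPopAll h).Pairwise (fun a b => toLex a ≤ toLex b) := by
  fun_induction pvPopAll h with
  | case1 => intro _; simp
  | case2 p l r ih =>
    intro hh
    obtain ⟨hl, hr, hol, hor⟩ := hh
    refine List.Pairwise.cons ?_ (ih (pvMerge_ordered l r hol hor))
    intro b hb
    have hb' := (pvMerge_perm l r).mem_iff.mp ((pvPopAll_perm (pvMerge l r)).mem_iff.mp hb)
    rcases List.mem_append.mp hb' with h1 | h2
    · exact hl b h1
    · exact hr b h2

-- A's while-loop, re-read as a scan over the list of pairs the heap pops (negated back)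
def pvScan (useLimit : Int) : List (Int × Int) → Int → PySem.Dict Int Int → Int → Int
  | [], _, _, res => res
  | p :: rest, numWanted, usage, res =>
      if numWanted = 0 then res
      else if usage.getD p.2 0 < useLimit then
        pvScan useLimit rest (numWanted - 1)
          (usage.insert p.2 (usage.getD p.2 0 + 1)) (res + p.1)
      else pvScan useLimit rest numWanted usage res

theorem pvALoop_eq_pvScan (ul : Int) (fuel : Nat) (h : PvHeap) (nw : Int)
    (u : PySem.Dict Int Int) (r : Int) (hf : h.size ≤ fuel) :
    pvALoop ul fuel h nw u r = pvScan ul ((pvPopAll h).map (fun q => (-q.1, q.2))) nw u r := by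
  induction fuel generalizing h nw u r with
  | zero =>
    cases h with
    | nil => simp [pvALoop, pvPopAll, pvScan]
    | node p l r' => simp [PvHeap.size] at hf
  | succ fuel ih =>
    cases h with
    | nil => simp [pvALoop, pvPopAll, pvScan]
    | node p l r' =>
      have hf' : (pvMerge l r').size ≤ fuel := by
        rw [pvMerge_size]
        simp [PvHeap.size] at hf
        omega
      simp only [pvALoop, pvPopAll, List.map_cons, pvScan]
      split_ifs <;> simp_all [ih _ _ _ _ hf']

theorem pvBuild_perm (xs : List (Int × Int)) (h0 : PvHeap) :
    (pvElems (xs.foldl (fun h p => pvMerge (PvHeap.node (-p.1, p.2) PvHeap.nil PvHeap.nil) h) h0)).Perm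
      (pvElems h0 ++ xs.map (fun p => (-p.1, p.2))) := by
  induction xs generalizing h0 with
  | nil => simp
  | cons x xs ih =>
    simp only [List.foldl_cons, List.map_cons]
    refine (ih _).trans ?_
    have h1 := (pvMerge_perm (PvHeap.node (-x.1, x.2) PvHeap.nil PvHeap.nil) h0).append_right
      (xs.map (fun p => (-p.1, p.2)))
    refine h1.trans ?_
    simp only [pvElems, List.nil_append, List.append_nil, List.cons_append]
    exact List.perm_middle.symm

theorem pvBuild_ordered (xs : List (Int × Int)) (h0 : PvHeap) (h : pvOrdered h0) :
    pvOrdered (xs.foldl (fun h p => pvMerge (PvHeap.node (-p.1, p.2) PvHeap.nil PvHeap.nil) h) h0) := by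
  induction xs generalizing h0 with
  | nil => exact h
  | cons x xs ih =>
    refine ih _ (pvMerge_ordered _ _ ?_ h)
    simp [pvOrdered, pvElems]

theorem pvBefore_eq (a b : Int × Int) :
    (decide ((-a.1 : Int) < -b.1) || (!decide ((-b.1 : Int) < -a.1) && decide (a.2 < b.2)))
      = decide (toLex ((-a.1 : Int), a.2) < toLex ((-b.1 : Int), b.2)) := by
  rw [Bool.eq_iff_iff]
  simp only [Bool.or_eq_true, Bool.and_eq_true, Bool.not_eq_true',
    decide_eq_true_eq, decide_eq_false_iff_not, Prod.Lex.toLex_lt_toLex]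
  constructor <;> intro h <;> omega

theorem pvSorted2_eq (xs : List (Int × Int)) :
    PySem.List.sorted2 xs (fun p => -p.1) (fun p => p.2)
      = PySem.List.sorted xs pvKey := by
  have hb : (fun a b : Int × Int =>
        decide ((-a.1 : Int) < -b.1) || (!decide ((-b.1 : Int) < -a.1) && decide (a.2 < b.2)))
      = (fun a b : Int × Int => decide (pvKey a < pvKey b)) :=
    funext fun a => funext fun b => pvBefore_eq a b
  show (xs.foldl (fun acc x => PySem.List.insertBy (fun a b : Int × Int =>
        decide ((-a.1 : Int) < -b.1) || (!decide ((-b.1 : Int) < -a.1) && decide (a.2 < b.2))) x acc) [])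
      = (xs.foldl (fun acc x => PySem.List.insertBy (fun a b : Int × Int =>
        decide (pvKey a < pvKey b)) x acc) [])
  rw [hb]

theorem pvSorted2_pairwise (xs : List (Int × Int)) :
    (PySem.List.sorted2 xs (fun p => -p.1) (fun p => p.2)).Pairwise
      (fun a b => pvKey a ≤ pvKey b) := by
  rw [pvSorted2_eq]
  exact PySem.List.sorted_pairwise _ _

theorem pvMapMap (ys : List (Int × Int)) :
    (ys.map (fun p : Int × Int => ((-p.1 : Int), p.2))).map (fun p : Int × Int => ((-p.1 : Int), p.2)) = ys := by
  simp [List.map_map, Function.comp_def]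

-- A's result = scan of the sorted pair list
theorem pvA_eq_scan (values labels : List Int) (nw ul : Int) :
    largestValsFromLabels values labels nw ul
      = pvScan ul (PySem.List.sorted2 (values.zip labels) (fun p => -p.1) (fun p => p.2))
          nw PySem.Dict.empty 0 := by
  simp only [largestValsFromLabels]
  rw [pvALoop_eq_pvScan _ _ _ _ _ _ (le_refl _)]
  congr 1
  set H := (values.zip labels).foldl
    (fun h p => pvMerge (PvHeap.node (-p.1, p.2) PvHeap.nil PvHeap.nil) h) PvHeap.nil with hH
  have hord : pvOrdered H := pvBuild_ordered _ _ (by simp [pvOrdered])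
  have hperm : ((pvPopAll H).map (fun q => (-q.1, q.2))).Perm
      (PySem.List.sorted2 (values.zip labels) (fun p => -p.1) (fun p => p.2)) := by
    have p1 := (pvPopAll_perm H).map (fun q : Int × Int => ((-q.1 : Int), q.2))
    have p2 := (pvBuild_perm (values.zip labels) PvHeap.nil).map (fun q : Int × Int => ((-q.1 : Int), q.2))
    simp only [pvElems, List.nil_append, pvMapMap] at p2
    exact (p1.trans p2).trans (PySem.List.sorted2_perm (values.zip labels) _ _ _).symm
  have pwL : ((pvPopAll H).map (fun q => (-q.1, q.2))).Pairwise
      (fun a b : Int × Int => pvKey a ≤ pvKey b) := by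
    rw [List.pairwise_map]
    exact (pvPopAll_pairwise H hord).imp (fun hab => by simpa [pvKey] using hab)
  exact PySem.List.eq_of_perm_of_pairwise_le_of_injective
    pvKey pvKeyInj hperm pwL (pvSorted2_pairwise _)

-- ---------- the common middle form: cap-filter then select ----------
-- the elements A's scan keeps, independent of numWanted
def pvCapF (ul : Int) : List (Int × Int) → PySem.Dict Int Int → List (Int × Int)
  | [], _ => []
  | p :: rest, u =>
      if u.getD p.2 0 < ul then p :: pvCapF ul rest (u.insert p.2 (u.getD p.2 0 + 1))
      else pvCapF ul rest u

theorem pvSel_zero (xs : List (Int × Int)) (r : Int) : pvSel xs 0 r = r := by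
  cases xs <;> simp [pvSel]

theorem pvScan_eq_sel_capF (ul : Int) (xs : List (Int × Int)) (nw : Int)
    (u : PySem.Dict Int Int) (r : Int) :
    pvScan ul xs nw u r = pvSel (pvCapF ul xs u) nw r := by
  induction xs generalizing nw u r with
  | nil => simp [pvScan, pvCapF, pvSel]
  | cons p rest ih =>
    by_cases hnw : nw = 0
    · subst hnw
      simp only [pvScan, pvCapF]
      split_ifs <;> simp [pvSel, pvSel_zero]
    · by_cases hc : u.getD p.2 0 < ul
      · simp [pvScan, pvCapF, pvSel, hnw, hc, ih]
      · simp [pvScan, pvCapF, hnw, hc, ih]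

theorem pvCapF_sublist (ul : Int) (xs : List (Int × Int)) (u : PySem.Dict Int Int) :
    (pvCapF ul xs u).Sublist xs := by
  induction xs generalizing u with
  | nil => simp [pvCapF]
  | cons p rest ih =>
    simp only [pvCapF]
    split_ifs
    · exact (ih _).cons₂ p
    · exact (ih _).cons p

theorem pvTake_nonpos {α : Type} (k : Int) (xs : List α) (h : k ≤ 0) : pvTake k xs = [] := by
  cases xs <;> simp [pvTake, h]

theorem pvTake_map {α β : Type} (f : α → β) (k : Int) (xs : List α) :
    pvTake k (xs.map f) = (pvTake k xs).map f := by
  induction xs generalizing k with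
  | nil => simp [pvTake]
  | cons x xs ih => simp only [List.map_cons, pvTake]; split_ifs <;> simp [ih]

-- per-label content of the cap-filter: the first (ul - used) same-label elements
theorem pvCapF_filter (ul : Int) (l : Int) (xs : List (Int × Int)) (u : PySem.Dict Int Int) :
    (pvCapF ul xs u).filter (fun p => decide (p.2 = l))
      = pvTake (ul - u.getD l 0) (xs.filter (fun p => decide (p.2 = l))) := by
  induction xs generalizing u with
  | nil => simp [pvCapF, pvTake]
  | cons p rest ih =>
    obtain ⟨v, m⟩ := p
    by_cases hpl : m = l
    · subst hpl
      by_cases hc : u.getD m 0 < ul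
      · have hstep : pvCapF ul ((v, m) :: rest) u
            = (v, m) :: pvCapF ul rest (u.insert m (u.getD m 0 + 1)) := by
          simp [pvCapF, hc]
        have hgd : (u.insert m (u.getD m 0 + 1)).getD m 0 = u.getD m 0 + 1 := by
          rw [PySem.Dict.getD_insert]; simp
        have hk : ¬ (ul - u.getD m 0 ≤ 0) := by omega
        rw [hstep]
        simp only [List.filter_cons, decide_true, if_true]
        rw [ih, hgd]
        simp only [pvTake, if_neg hk]
        have harith : ul - (u.getD m 0 + 1) = ul - u.getD m 0 - 1 := by ring
        rw [harith]
      · have hstep : pvCapF ul ((v, m) :: rest) u = pvCapF ul rest u := by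
          simp [pvCapF, hc]
        have hk : ul - u.getD m 0 ≤ 0 := by omega
        rw [hstep, ih, pvTake_nonpos _ _ hk, pvTake_nonpos _ _ hk]
    · by_cases hc : u.getD m 0 < ul
      · have hstep : pvCapF ul ((v, m) :: rest) u
            = (v, m) :: pvCapF ul rest (u.insert m (u.getD m 0 + 1)) := by
          simp [pvCapF, hc]
        have hgd : (u.insert m (u.getD m 0 + 1)).getD l 0 = u.getD l 0 := by
          rw [PySem.Dict.getD_insert]
          rw [if_neg (show ¬ l = m from fun h => hpl (Eq.symm h))]
        rw [hstep]
        simp only [List.filter_cons, hpl, decide_false]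
        rw [ih, hgd]
        simp
      · have hstep : pvCapF ul ((v, m) :: rest) u = pvCapF ul rest u := by
          simp [pvCapF, hc]
        rw [hstep, ih]
        simp [hpl]

-- ---------- B side ----------
-- all pairs of a same-label list are (fst, l)
theorem pvMapFstLabel (l : Int) (ys : List (Int × Int)) (h : ∀ p ∈ ys, p.2 = l) :
    ys.map (fun p => (p.1, l)) = ys := by
  induction ys with
  | nil => simp
  | cons p rest ih =>
    have hp := h p (List.mem_cons_self)
    simp only [List.map_cons, ih (fun q hq => h q (List.mem_cons_of_mem _ hq))]
    rw [← hp]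

-- the bucket for label l is exactly the same-label values of the input, in order
theorem pvGroups_getD (l : Int) (xs : List (Int × Int)) (u : PySem.Dict Int (List Int)) :
    (xs.foldl (fun d p => d.insert p.2 (d.getD p.2 [] ++ [p.1])) u).getD l []
      = u.getD l [] ++ (xs.filter (fun p => decide (p.2 = l))).map (fun p => p.1) := by
  induction xs generalizing u with
  | nil => simp
  | cons p rest ih =>
    obtain ⟨v, m⟩ := p
    simp only [List.foldl_cons, List.filter_cons]
    rw [ih]
    by_cases hpl : m = l
    · subst hpl
      rw [PySem.Dict.getD_insert]
      simp
    · rw [PySem.Dict.getD_insert]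
      rw [if_neg (show ¬ l = m from fun h => hpl (Eq.symm h))]
      simp [hpl]

-- filtering the sorted pair list to one label = the bucket sorted descending, tagged
theorem pvS_filter (values labels : List Int) (l : Int) :
    (PySem.List.sorted2 (values.zip labels) (fun p => -p.1) (fun p => p.2)).filter
        (fun p => decide (p.2 = l))
      = (PySem.List.sorted (((values.zip labels).filter (fun p => decide (p.2 = l))).map (fun p => p.1))
          (fun x => x) true).map (fun v => (v, l)) := by
  set S := PySem.List.sorted2 (values.zip labels) (fun p => -p.1) (fun p => p.2) with hS
  set g := ((values.zip labels).filter (fun p => decide (p.2 = l))).map (fun p => p.1) with hg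
  have hmem : ∀ p ∈ (values.zip labels).filter (fun p => decide (p.2 = l)), p.2 = l := by
    intro p hp
    simpa using (List.mem_filter.mp hp).2
  have hperm : ((PySem.List.sorted g (fun x => x) true).map (fun v => (v, l))).Perm
      (S.filter (fun p => decide (p.2 = l))) := by
    have h1 : (PySem.List.sorted g (fun x => x) true).Perm g := PySem.List.sorted_perm _ _ _
    have h2 := h1.map (fun v => (v, l))
    have h3 : g.map (fun v => (v, l)) = (values.zip labels).filter (fun p => decide (p.2 = l)) := by
      rw [hg, List.map_map]
      exact pvMapFstLabel l _ hmem
    rw [h3] at h2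
    have h4 : S.Perm (values.zip labels) := by
      rw [hS, pvSorted2_eq]
      exact PySem.List.sorted_perm _ _ _
    exact h2.trans (h4.filter _).symm
  have pwR : ((PySem.List.sorted g (fun x => x) true).map (fun v => (v, l))).Pairwise
      (fun a b : Int × Int => pvKey a ≤ pvKey b) := by
    rw [List.pairwise_map]
    refine (PySem.List.sorted_pairwise_rev g (fun x => x)).imp ?_
    intro a b hab
    simp only [pvKey]
    rcases lt_or_eq_of_le hab with h | h
    · exact le_of_lt (Prod.Lex.toLex_lt_toLex.mpr (Or.inl (by omega)))
    · exact le_of_eq (by rw [h])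
  have pwL : (S.filter (fun p => decide (p.2 = l))).Pairwise
      (fun a b : Int × Int => pvKey a ≤ pvKey b) := by
    refine List.Pairwise.sublist List.filter_sublist ?_
    rw [hS]
    exact pvSorted2_pairwise _
  exact (PySem.List.eq_of_perm_of_pairwise_le_of_injective pvKey pvKeyInj hperm pwR pwL).symm

-- filtering B's candidate list to one label = that label's capped block
theorem pvCand_filter_aux (f : Int → List Int) (ul l : Int) (ks : List Int) (hnd : ks.Nodup) :
    (ks.flatMap (fun k => (pvTake ul (PySem.List.sorted (f k) (fun x => x) true)).map
        (fun v => (v, k)))).filter (fun p => decide (p.2 = l))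
      = if l ∈ ks
        then (pvTake ul (PySem.List.sorted (f l) (fun x => x) true)).map (fun v => (v, l))
        else [] := by
  induction ks with
  | nil => simp
  | cons k ks ih =>
    have hndk : ks.Nodup := (List.nodup_cons.mp hnd).2
    have hknk : k ∉ ks := (List.nodup_cons.mp hnd).1
    simp only [List.flatMap_cons, List.filter_append, List.mem_cons]
    rw [ih hndk]
    by_cases hkl : k = l
    · subst hkl
      have hblk : ((pvTake ul (PySem.List.sorted (f k) (fun x => x) true)).map
            (fun v => (v, k))).filter (fun p => decide (p.2 = k))
          = (pvTake ul (PySem.List.sorted (f k) (fun x => x) true)).map (fun v => (v, k)) := by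
        rw [List.filter_eq_self]
        intro p hp
        obtain ⟨v, _, rfl⟩ := List.mem_map.mp hp
        simp
      rw [hblk, if_neg (fun h => hknk h), if_pos (Or.inl rfl)]
      simp
    · have hblk : ((pvTake ul (PySem.List.sorted (f k) (fun x => x) true)).map
            (fun v => (v, k))).filter (fun p => decide (p.2 = l)) = [] := by
        rw [List.filter_eq_nil_iff]
        intro p hp
        obtain ⟨v, _, rfl⟩ := List.mem_map.mp hp
        simp [hkl]
      rw [hblk]
      simp only [List.nil_append]
      by_cases hl : l ∈ ks
      · rw [if_pos hl, if_pos (Or.inr hl)]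
      · rw [if_neg hl, if_neg (by rintro (h | h); exact hkl h.symm; exact hl h)]

theorem pvCand_filter (groups : PySem.Dict Int (List Int)) (ul l : Int)
    (hnd : groups.keys.Nodup) :
    (groups.items.foldl
        (fun acc q => acc ++ (pvTake ul (PySem.List.sorted q.2 (fun x => x) true)).map (fun v => (v, q.1))) []).filter
        (fun p => decide (p.2 = l))
      = if l ∈ groups.keys
        then (pvTake ul (PySem.List.sorted (groups.getD l []) (fun x => x) true)).map (fun v => (v, l))
        else [] := by
  rw [PySem.List.foldl_append_eq_flatMap]
  rw [PySem.Dict.items_eq_map_keys groups hnd []]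
  rw [List.flatMap_map]
  exact pvCand_filter_aux (fun k => groups.getD k []) ul l groups.keys hnd

-- the main bridge: A's cap-filter of the sorted pairs IS B's sorted candidate list
theorem pvCapF_eq_sortedCand (values labels : List Int) (ul : Int) :
    pvCapF ul (PySem.List.sorted2 (values.zip labels) (fun p => -p.1) (fun p => p.2))
        PySem.Dict.empty
      = PySem.List.sorted2
          (((values.zip labels).foldl
              (fun d p => d.insert p.2 (d.getD p.2 [] ++ [p.1]))
              (PySem.Dict.empty (κ := Int) (ν := List Int))).items.foldl
            (fun acc q => acc ++ (pvTake ul (PySem.List.sorted q.2 (fun x => x) true)).map (fun v => (v, q.1))) [])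
          (fun p => -p.1) (fun p => p.2) := by
  set S := PySem.List.sorted2 (values.zip labels) (fun p => -p.1) (fun p => p.2) with hS
  set groups := (values.zip labels).foldl
      (fun d p => d.insert p.2 (d.getD p.2 [] ++ [p.1]))
      (PySem.Dict.empty (κ := Int) (ν := List Int)) with hgroups
  set cand := groups.items.foldl
      (fun acc q => acc ++ (pvTake ul (PySem.List.sorted q.2 (fun x => x) true)).map (fun v => (v, q.1))) []
    with hcand
  have hnd : groups.keys.Nodup := by
    rw [hgroups]
    exact PySem.Dict.nodup_keys_foldl_insert_key (values.zip labels)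
      (fun p : Int × Int => p.2)
      (fun (d : PySem.Dict Int (List Int)) (p : Int × Int) => d.getD p.2 [] ++ [p.1])
      PySem.Dict.empty PySem.Dict.nodup_keys_empty
  have hgd : ∀ l : Int, groups.getD l []
      = ((values.zip labels).filter (fun p => decide (p.2 = l))).map (fun p => p.1) := by
    intro l
    rw [hgroups, pvGroups_getD]
    simp [PySem.Dict.getD_empty]
  have hfilt : ∀ l : Int,
      (pvCapF ul S PySem.Dict.empty).filter (fun p => decide (p.2 = l))
        = cand.filter (fun p => decide (p.2 = l)) := by
    intro l
    have hL : (pvCapF ul S PySem.Dict.empty).filter (fun p => decide (p.2 = l))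
        = (pvTake ul (PySem.List.sorted (groups.getD l []) (fun x => x) true)).map
            (fun v => (v, l)) := by
      rw [pvCapF_filter, PySem.Dict.getD_empty, hS, pvS_filter, pvTake_map, hgd l]
      norm_num
    rw [hL, hcand, pvCand_filter groups ul l hnd]
    by_cases hl : l ∈ groups.keys
    · rw [if_pos hl]
    · rw [if_neg hl]
      have hget : groups.getD l [] = [] := by
        have h0 := (PySem.Dict.get?_eq_none_iff_not_mem_keys (d := groups) (k := l)).mpr hl
        simp [PySem.Dict.getD, h0]
      rw [hget]
      rfl
  have hperm : (pvCapF ul S PySem.Dict.empty).Perm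
      (PySem.List.sorted2 cand (fun p => -p.1) (fun p => p.2)) := by
    rw [List.perm_iff_count]
    intro a
    have h1 : (pvCapF ul S PySem.Dict.empty).count a
        = ((pvCapF ul S PySem.Dict.empty).filter (fun p => decide (p.2 = a.2))).count a := by
      rw [List.count_filter]
      simp
    have h2 : (cand.filter (fun p => decide (p.2 = a.2))).count a = cand.count a := by
      rw [List.count_filter]
      simp
    rw [h1, hfilt a.2, h2]
    exact (List.Perm.count_eq (PySem.List.sorted2_perm cand _ _ _) a).symm
  have pwCap : (pvCapF ul S PySem.Dict.empty).Pairwise (fun a b => pvKey a ≤ pvKey b) := by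
    refine List.Pairwise.sublist (pvCapF_sublist ul S PySem.Dict.empty) ?_
    rw [hS]
    exact pvSorted2_pairwise _
  exact PySem.List.eq_of_perm_of_pairwise_le_of_injective pvKey pvKeyInj hperm pwCap
    (pvSorted2_pairwise _)

-- ===== VERDICT (by name: the statement is the Claim_ definition above) =====
theorem largestValsFromLabels_spec : Claim_equal_largestValsFromLabels := by
  intro values labels numWanted useLimit _
  unfold Spec_largestValsFromLabels
  rw [pvA_eq_scan, pvScan_eq_sel_capF]
  simp only [largestValsFromLabels_alt]
  rw [pvCapF_eq_sortedCand]
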